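-- pv_equiv track=rewrite | github.com/ajmarin/coding | leetcode/02515_shortest_distance_to_target_string_in_a_circular_array.py | closestTarget
-- ===== SOURCE A (Python) =====
-- from typing import List
--
-- def closestTarget(words: List[str], target: str, startIndex: int) -> int:
--     n = len(words)
--     for i in range(1 + n // 2):
--         right = (startIndex + i) % n
--         left = (startIndex - i) % n
--         if words[right] == target or words[left] == target:
--             return i
--     return -1
-- ===== SOURCE B (Python) =====
-- from typing import List
--
-- def closestTarget(words: List[str], target: str, startIndex: int) -> int:
--     n = len(words)
--     s = startIndex % n
--     best = -1
--     for i, w in enumerate(words):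
--         if w == target:
--             d = abs(i - s)
--             d = min(d, n - d)
--             if best == -1 or d < best:
--                 best = d
--     return best
-- ===== Notes on version B (the rewrite author's own statement) =====
-- stated objective: alternative
-- what changed: Replaces A's outward-expanding probe from startIndex (testing (start+i)%n and (start-i)%n for growing i with early return) by a single left-to-right scan over all words that keeps the running minimum circular distance min(d, n-d) of every match.
import Mathlib
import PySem

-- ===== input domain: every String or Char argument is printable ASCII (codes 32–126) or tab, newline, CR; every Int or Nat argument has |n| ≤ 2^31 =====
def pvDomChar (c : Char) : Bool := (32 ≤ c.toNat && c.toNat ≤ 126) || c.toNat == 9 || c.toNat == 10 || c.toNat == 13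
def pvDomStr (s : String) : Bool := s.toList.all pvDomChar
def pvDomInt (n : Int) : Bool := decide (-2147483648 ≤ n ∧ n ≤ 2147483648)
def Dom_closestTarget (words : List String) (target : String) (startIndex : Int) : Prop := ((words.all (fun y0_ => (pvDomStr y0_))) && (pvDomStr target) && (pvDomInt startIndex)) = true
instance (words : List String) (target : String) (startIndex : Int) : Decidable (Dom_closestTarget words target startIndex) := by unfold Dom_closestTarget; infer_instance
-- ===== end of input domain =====

-- B replaces A's outward-expanding probe from startIndex by one full scan keeping the
-- minimum circular distance of all matches; return values only (no mutation in either).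

-- ===== PORT A =====
-- the 'for i in range(1 + n // 2): ... return i' loop, with early return on a match
def closestTargetGo (words : List String) (target : String) (startIndex n : Int) : List Int → Int
  | [] => -1
  | i :: rest =>
    if PySem.List.pyGet? words (PySem.Int.mod (startIndex + i) n) = some target ∨
       PySem.List.pyGet? words (PySem.Int.mod (startIndex - i) n) = some target
    then i
    else closestTargetGo words target startIndex n rest

def closestTarget (words : List String) (target : String) (startIndex : Int) : Int :=
  let n : Int := words.length
  closestTargetGo words target startIndex n (PySem.List.pyRange 0 (1 + PySem.Int.floordiv n 2) 1)

-- ===== PORT B =====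
def closestTarget_alt (words : List String) (target : String) (startIndex : Int) : Int :=
  let n : Int := words.length
  let s := PySem.Int.mod startIndex n
  (PySem.List.enumerate words).foldl
    (fun best iw =>
      if iw.2 = target then
        let d := min |iw.1 - s| (n - |iw.1 - s|)
        if best = -1 ∨ d < best then d else best
      else best) (-1)

-- ===== PRECONDITION & SPEC =====
-- Pre_ excludes only the empty list, on which A raises ZeroDivisionError (startIndex % 0); B raises there too.
def Pre_closestTarget (words : List String) (target : String) (startIndex : Int) : Prop := words ≠ []
instance (words : List String) (target : String) (startIndex : Int) : Decidable (Pre_closestTarget words target startIndex) := by unfold Pre_closestTarget; infer_instance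
def pvWitness_closestTarget : List String × String × Int := (["hello", "world"], "world", 0)

def Spec_closestTarget (words : List String) (target : String) (startIndex : Int) (out : Int) : Prop := out = closestTarget_alt words target startIndex
instance (words : List String) (target : String) (startIndex : Int) (out : Int) : Decidable (Spec_closestTarget words target startIndex out) := by unfold Spec_closestTarget; infer_instance

-- ===== CLAIM (what is proved, stated in full; the proofs are below) =====
def Claim_equal_closestTarget : Prop := ∀ (words : List String) (target : String) (startIndex : Int), Dom_closestTarget words target startIndex → Pre_closestTarget words target startIndex → Spec_closestTarget words target startIndex (closestTarget words target startIndex)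

-- ===== LEMMAS AND PROOFS =====

-- P i: the condition A tests at probe distance i
def probeHit (words : List String) (target : String) (startIndex : Int) (i : Int) : Prop :=
  PySem.List.pyGet? words (PySem.Int.mod (startIndex + i) (words.length : Int)) = some target ∨
  PySem.List.pyGet? words (PySem.Int.mod (startIndex - i) (words.length : Int)) = some target

-- the list of circular distances of the matches, in scan order
def matchDists (words : List String) (target : String) (startIndex : Int) : List Int :=
  (PySem.List.enumerate words).filterMap (fun iw =>
    if iw.2 = target then
      some (min |iw.1 - PySem.Int.mod startIndex (words.length : Int)|
                ((words.length : Int) - |iw.1 - PySem.Int.mod startIndex (words.length : Int)|))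
    else none)

theorem go_eq_neg (words : List String) (target : String) (startIndex n : Int) (l : List Int)
    (h : ∀ i ∈ l, ¬ (PySem.List.pyGet? words (PySem.Int.mod (startIndex + i) n) = some target ∨
                     PySem.List.pyGet? words (PySem.Int.mod (startIndex - i) n) = some target)) :
    closestTargetGo words target startIndex n l = -1 := by
  induction l with
  | nil => rfl
  | cons i rest ih =>
    simp only [closestTargetGo]
    rw [if_neg (h i (by simp))]
    exact ih (fun j hj => h j (by simp [hj]))

theorem go_eq_first (words : List String) (target : String) (startIndex n : Int)
    (l1 : List Int) (m : Int) (l2 : List Int)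
    (h1 : ∀ i ∈ l1, ¬ (PySem.List.pyGet? words (PySem.Int.mod (startIndex + i) n) = some target ∨
                       PySem.List.pyGet? words (PySem.Int.mod (startIndex - i) n) = some target))
    (hm : PySem.List.pyGet? words (PySem.Int.mod (startIndex + m) n) = some target ∨
          PySem.List.pyGet? words (PySem.Int.mod (startIndex - m) n) = some target) :
    closestTargetGo words target startIndex n (l1 ++ m :: l2) = m := by
  induction l1 with
  | nil => simp only [List.nil_append, closestTargetGo, if_pos hm]
  | cons i rest ih =>
    simp only [List.cons_append, closestTargetGo]
    rw [if_neg (h1 i (by simp))]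
    exact ih (fun j hj => h1 j (by simp [hj]))

theorem foldl_filterMap_eq {α β γ : Type} (f : γ → α → γ) (h : α → Option β) (g : γ → β → γ)
    (hfg : ∀ c a, f c a = (h a).elim c (g c)) :
    ∀ (l : List α) (c : γ), l.foldl f c = (l.filterMap h).foldl g c := by
  intro l
  induction l with
  | nil => intro c; rfl
  | cons a l ih =>
    intro c
    rw [List.foldl_cons, List.filterMap_cons, hfg c a]
    cases hh : h a <;> simp only [Option.elim, ih, List.foldl_cons]

-- B's fold over enumerate equals a min-fold over matchDists
theorem alt_eq_fold_matchDists (words : List String) (target : String) (startIndex : Int) :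
    closestTarget_alt words target startIndex =
    (matchDists words target startIndex).foldl
      (fun best d => if best = -1 ∨ d < best then d else best) (-1) := by
  unfold closestTarget_alt matchDists
  apply foldl_filterMap_eq
  intro c iw
  by_cases hw : iw.2 = target <;> simp [hw]

-- a min-fold with sentinel -1 over a list of nonnegatives: empty case
theorem minfold_nil :
    ([] : List Int).foldl (fun best d => if best = -1 ∨ d < best then d else best) (-1) = -1 := rfl

-- nonempty case: result is a member and a lower bound
theorem minfold_spec (l : List Int) (hne : l ≠ []) (hnn : ∀ d ∈ l, 0 ≤ d) :
    (l.foldl (fun best d => if best = -1 ∨ d < best then d else best) (-1)) ∈ l ∧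
    ∀ d ∈ l, (l.foldl (fun best d => if best = -1 ∨ d < best then d else best) (-1)) ≤ d := by
  have go : ∀ (l : List Int) (a : Int), 0 ≤ a → (∀ d ∈ l, 0 ≤ d) →
      (l.foldl (fun best d => if best = -1 ∨ d < best then d else best) a) ∈ a :: l ∧
      ∀ d ∈ a :: l, (l.foldl (fun best d => if best = -1 ∨ d < best then d else best) a) ≤ d := by
    intro l
    induction l with
    | nil => intro a _ _; simp
    | cons d l ih =>
      intro a ha hnn
      rw [List.foldl_cons]
      have hd0 : 0 ≤ d := hnn d (by simp)
      have hstep : (if a = -1 ∨ d < a then d else a) = if d < a then d else a := by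
        by_cases h : d < a <;> simp [h] <;> omega
      rw [hstep]
      by_cases hda : d < a
      · rw [if_pos hda]
        obtain ⟨hmem, hbnd⟩ := ih d hd0 (fun x hx => hnn x (by simp [hx]))
        constructor
        · rcases List.mem_cons.mp hmem with h | h
          · simp [h]
          · simp [h]
        · intro x hx
          simp only [List.mem_cons] at hx
          have h1 := hbnd _ List.mem_cons_self
          rcases hx with h | h | h
          · omega
          · omega
          · exact hbnd x (by simp [h])
      · rw [if_neg hda]
        obtain ⟨hmem, hbnd⟩ := ih a ha (fun x hx => hnn x (by simp [hx]))
        constructor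
        · rcases List.mem_cons.mp hmem with h | h
          · simp [h]
          · simp [h]
        · intro x hx
          simp only [List.mem_cons] at hx
          have h1 := hbnd _ List.mem_cons_self
          rcases hx with h | h | h
          · omega
          · omega
          · exact hbnd x (by simp [h])
  cases l with
  | nil => exact absurd rfl hne
  | cons d l =>
    rw [List.foldl_cons]
    have h1 : (if (-1 : Int) = -1 ∨ d < -1 then d else -1) = d := by simp
    rw [h1]
    have hd0 : 0 ≤ d := hnn d (by simp)
    exact go l d hd0 (fun x hx => hnn x (by simp [hx]))

-- every element of matchDists is a valid circular distance: nonneg, ≤ n/2, and probed by A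
theorem matchDists_mem (words : List String) (target : String) (startIndex : Int)
    (hne : words ≠ []) (m : Int) (hm : m ∈ matchDists words target startIndex) :
    0 ≤ m ∧ m ≤ PySem.Int.floordiv (words.length : Int) 2 ∧ probeHit words target startIndex m := by
  have hn : (0 : Int) < (words.length : Int) := by
    have := List.length_pos_iff.mpr hne; exact_mod_cast this
  have hs : PySem.Int.mod startIndex (words.length : Int) = startIndex % (words.length : Int) :=
    PySem.Int.mod_eq_emod_of_pos hn
  unfold matchDists at hm
  obtain ⟨iw, hiw, heq⟩ := List.mem_filterMap.mp hm
  obtain ⟨k, hk, hkeq⟩ := (PySem.List.mem_enumerate_iff _ _ _).mp hiw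
  subst hkeq
  by_cases hw : words[k] = target
  · simp only [hw] at heq
    have hmval := Option.some.inj heq
    set n : Int := (words.length : Int) with hn'
    set s : Int := PySem.Int.mod startIndex n with hs'
    have hsb : 0 ≤ s ∧ s < n := by
      rw [hs']
      rw [show PySem.Int.mod startIndex n = startIndex % n from hs]
      exact ⟨Int.emod_nonneg _ (by omega), Int.emod_lt_of_pos _ hn⟩
    have hkn : (k : Int) < n := by rw [hn']; exact_mod_cast hk
    have hq : n * (startIndex / n) + s = startIndex := by
      rw [hs]; exact Int.ediv_add_emod startIndex n
    have key : ∀ t : Int, t % n = (k : Int) →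
        PySem.List.pyGet? words (PySem.Int.mod t n) = some target := by
      intro t ht
      rw [show PySem.Int.mod t n = t % n from PySem.Int.mod_eq_emod_of_pos hn, ht,
          PySem.List.pyGet?_natCast, List.getElem?_eq_getElem hk, hw]
    have habs := abs_cases ((0 : Int) + (k : Int) - s)
    refine ⟨?_, ?_, ?_⟩
    · rcases habs with ⟨h1, h2⟩ | ⟨h1, h2⟩ <;> omega
    · rw [show PySem.Int.floordiv n 2 = n / 2 from PySem.Int.floordiv_eq_ediv_of_pos (by omega)]
      rcases habs with ⟨h1, h2⟩ | ⟨h1, h2⟩ <;> omega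
    · unfold probeHit
      rw [← hn']
      by_cases hc : s + m = (k : Int) ∨ s + m = (k : Int) + n
      · left
        apply key
        rw [show startIndex + m = (s + m) + n * (startIndex / n) by omega,
            Int.add_mul_emod_self_left]
        rcases hc with h | h
        · rw [h, Int.emod_eq_of_lt (by omega) (by omega)]
        · rw [h, Int.add_emod_right, Int.emod_eq_of_lt (by omega) (by omega)]
      · right
        apply key
        rw [show startIndex - m = (s - m) + n * (startIndex / n) by omega,
            Int.add_mul_emod_self_left]
        have hd : s - m = (k : Int) ∨ s - m = (k : Int) - n := by
          rcases habs with ⟨h1, h2⟩ | ⟨h1, h2⟩ <;> omega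
        rcases hd with h | h
        · rw [h, Int.emod_eq_of_lt (by omega) (by omega)]
        · rw [h, show (k : Int) - n = (k : Int) + n * (-1) by ring,
              Int.add_mul_emod_self_left, Int.emod_eq_of_lt (by omega) (by omega)]
  · simp [hw] at heq

-- arithmetic core: a position congruent to s ± i has circular distance ≤ i
theorem dist_le (n s r i e q : Int) (hn : 0 < n) (hs0 : 0 ≤ s) (hsn : s < n)
    (hr0 : 0 ≤ r) (hrn : r < n) (hi : 0 ≤ i) (he : e = i ∨ e = -i)
    (hqr : r - s = e - q * n) : min |r - s| (n - |r - s|) ≤ i := by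
  have habs := abs_cases (r - s)
  rcases lt_trichotomy q 0 with hq | hq | hq
  · rcases eq_or_lt_of_le (by omega : q ≤ -1) with h | h
    · have hqn : q * n = -n := by rw [h]; ring
      rcases habs with ⟨h1, h2⟩ | ⟨h1, h2⟩ <;> rcases he with he | he <;> omega
    · have hqn : q * n ≤ -2 * n := mul_le_mul_of_nonneg_right (by omega : q ≤ -2) (by omega)
      rcases habs with ⟨h1, h2⟩ | ⟨h1, h2⟩ <;> rcases he with he | he <;> omega
  · rw [hq, zero_mul] at hqr
    rcases habs with ⟨h1, h2⟩ | ⟨h1, h2⟩ <;> rcases he with he | he <;> omega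
  · rcases eq_or_lt_of_le (by omega : 1 ≤ q) with h | h
    · have hqn : q * n = n := by rw [← h]; ring
      rcases habs with ⟨h1, h2⟩ | ⟨h1, h2⟩ <;> rcases he with he | he <;> omega
    · have hqn : 2 * n ≤ q * n := mul_le_mul_of_nonneg_right (by omega : 2 ≤ q) (by omega)
      rcases habs with ⟨h1, h2⟩ | ⟨h1, h2⟩ <;> rcases he with he | he <;> omega

-- conversely every probe hit at 0 ≤ i yields a match distance ≤ i
theorem probeHit_to_matchDists (words : List String) (target : String) (startIndex : Int)
    (hne : words ≠ []) (i : Int) (hi : 0 ≤ i)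
    (h : probeHit words target startIndex i) :
    ∃ m ∈ matchDists words target startIndex, m ≤ i := by
  have hn : (0 : Int) < (words.length : Int) := by
    have := List.length_pos_iff.mpr hne; exact_mod_cast this
  have hseq : PySem.Int.mod startIndex (words.length : Int) = startIndex % (words.length : Int) :=
    PySem.Int.mod_eq_emod_of_pos hn
  have hs0 : 0 ≤ PySem.Int.mod startIndex (words.length : Int) := by
    rw [hseq]; exact Int.emod_nonneg _ (by omega)
  have hsn : PySem.Int.mod startIndex (words.length : Int) < (words.length : Int) := by
    rw [hseq]; exact Int.emod_lt_of_pos _ hn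
  have extract : ∀ t : Int,
      PySem.List.pyGet? words (PySem.Int.mod t (words.length : Int)) = some target →
      ∃ (k : Nat) (hk : k < words.length), words[k] = target ∧ (k : Int) = t % (words.length : Int) := by
    intro t ht
    rw [show PySem.Int.mod t (words.length : Int) = t % (words.length : Int) from
          PySem.Int.mod_eq_emod_of_pos hn,
        PySem.List.pyGet?_of_nonneg words (Int.emod_nonneg t (by omega))] at ht
    obtain ⟨hlt, hw⟩ := List.getElem?_eq_some_iff.mp ht
    have hrn : t % (words.length : Int) < (words.length : Int) := Int.emod_lt_of_pos _ hn
    exact ⟨(t % (words.length : Int)).toNat, hlt, hw, by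
      have := Int.emod_nonneg t (show (words.length : Int) ≠ 0 by omega); omega⟩
  have build : ∀ (k : Nat), k < words.length → words[k]? = some target →
      min |(k : Int) - PySem.Int.mod startIndex (words.length : Int)|
          ((words.length : Int) - |(k : Int) - PySem.Int.mod startIndex (words.length : Int)|) ∈
        matchDists words target startIndex := by
    intro k hk hw
    have hw' : words[k] = target := by
      rwa [List.getElem?_eq_getElem hk, Option.some.injEq] at hw
    unfold matchDists
    exact List.mem_filterMap.mpr ⟨(0 + (k : Int), words[k]),
      (PySem.List.mem_enumerate_iff _ _ _).mpr ⟨k, hk, rfl⟩, by simp [hw']⟩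
  unfold probeHit at h
  rcases h with h | h
  · obtain ⟨k, hk, hw, hkr⟩ := extract _ h
    refine ⟨_, build k hk (by rw [List.getElem?_eq_getElem hk, hw]), ?_⟩
    apply dist_le ((words.length : Int)) _ _ i i ((startIndex + i) / (words.length : Int) - startIndex / (words.length : Int)) hn hs0 hsn
      (by positivity) (by exact_mod_cast hk) hi (Or.inl rfl)
    have e1 := Int.ediv_add_emod (startIndex + i) (words.length : Int)
    have e2 := Int.ediv_add_emod startIndex (words.length : Int)
    rw [hkr, hseq]
    linear_combination e1 - e2
  · obtain ⟨k, hk, hw, hkr⟩ := extract _ h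
    refine ⟨_, build k hk (by rw [List.getElem?_eq_getElem hk, hw]), ?_⟩
    apply dist_le ((words.length : Int)) _ _ i (-i) ((startIndex - i) / (words.length : Int) - startIndex / (words.length : Int)) hn hs0 hsn
      (by positivity) (by exact_mod_cast hk) hi (Or.inr rfl)
    have e1 := Int.ediv_add_emod (startIndex - i) (words.length : Int)
    have e2 := Int.ediv_add_emod startIndex (words.length : Int)
    rw [hkr, hseq]
    linear_combination e1 - e2

-- ===== VERDICT (by name: the statement is the Claim_ definition above) =====
theorem closestTarget_spec : Claim_equal_closestTarget := by
  intro words target startIndex _ hpre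
  unfold Spec_closestTarget
  have hn : (0 : Int) < (words.length : Int) := by
    have := List.length_pos_iff.mpr hpre; exact_mod_cast this
  rw [alt_eq_fold_matchDists]
  by_cases hM : matchDists words target startIndex = []
  · rw [hM, minfold_nil]
    show closestTargetGo words target startIndex (words.length : Int)
      (PySem.List.pyRange 0 (1 + PySem.Int.floordiv (words.length : Int) 2) 1) = -1
    apply go_eq_neg
    intro i hiR hP
    obtain ⟨m, hm, _⟩ := probeHit_to_matchDists words target startIndex hpre i
      (PySem.List.mem_pyRange_one.mp hiR).1 hP
    rw [hM] at hm
    exact absurd hm (List.not_mem_nil)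
  · obtain ⟨hmem, hbnd⟩ := minfold_spec _ hM
      (fun d hd => (matchDists_mem words target startIndex hpre d hd).1)
    obtain ⟨hb0, hb2, hbP⟩ := matchDists_mem words target startIndex hpre _ hmem
    show closestTargetGo words target startIndex (words.length : Int)
      (PySem.List.pyRange 0 (1 + PySem.Int.floordiv (words.length : Int) 2) 1) = _
    have hfd : PySem.Int.floordiv (words.length : Int) 2 = (words.length : Int) / 2 :=
      PySem.Int.floordiv_eq_ediv_of_pos (by omega)
    have hlt : (matchDists words target startIndex).foldl
        (fun best d => if best = -1 ∨ d < best then d else best) (-1) <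
        1 + PySem.Int.floordiv (words.length : Int) 2 := by
      rw [hfd] at hb2 ⊢; omega
    rw [PySem.List.pyRange_one_append 0
          ((matchDists words target startIndex).foldl
            (fun best d => if best = -1 ∨ d < best then d else best) (-1))
          (1 + PySem.Int.floordiv (words.length : Int) 2) hb0 (by omega),
        PySem.List.pyRange_one_cons hlt]
    apply go_eq_first
    · intro j hj hPj
      obtain ⟨m, hm, hmj⟩ := probeHit_to_matchDists words target startIndex hpre j
        (PySem.List.mem_pyRange_one.mp hj).1 hPj
      have hjlt := (PySem.List.mem_pyRange_one.mp hj).2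
      have := hbnd m hm
      omega
    · exact hbP
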